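-- pv_equiv track=rewrite | github.com/wulinjuan/Struct-XLM | data/UD_data/preprocess.py | generate_lines_for_sent
-- ===== SOURCE A (Python) =====
-- def generate_lines_for_sent(lines):
--     '''Yields batches of lines describing a sentence in conllx.
--
--     Args:
--       lines: Each line of a conllx file.
--     Yields:
--       a list of lines describing a single sentence in conllx.
--     '''
--     buf = []
--     id = ''
--     for line in lines:
--         if line.startswith('#'):
--             if line.startswith('# sent_id = '):
--                 id = line.strip().replace("# sent_id = ", "")
--             continue
--         if not line.strip():
--             if buf:
--                 yield id, buf
--                 buf = []
--             else:
--                 continue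
--         else:
--             buf.append(line.strip())
--     if buf:
--         yield id, buf
-- ===== SOURCE B (Python) =====
-- def _blocks(lines):
--     """Split lines into maximal runs of consecutive non-blank lines."""
--     blocks = []
--     cur = []
--     for line in lines:
--         if line.strip():
--             cur.append(line)
--         else:
--             if cur:
--                 blocks.append(cur)
--             cur = []
--     if cur:
--         blocks.append(cur)
--     return blocks
--
--
-- def generate_lines_for_sent(lines):
--     '''Yields batches of lines describing a sentence in conllx.
--
--     Two-phase decomposition: first split into blank-separated blocks,
--     then scan each block once, carrying the sent_id across blocks.
--     '''
--     id = ''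
--     for block in _blocks(lines):
--         tokens = []
--         for line in block:
--             if line.startswith('# sent_id = '):
--                 id = line.strip().replace('# sent_id = ', '')
--             elif not line.startswith('#'):
--                 tokens.append(line.strip())
--         if tokens:
--             yield id, tokens
-- ===== Notes on version B (the rewrite author's own statement) =====
-- stated objective: alternative
-- what changed: Replaces A's per-line state machine (buffer + flush-on-blank) with a two-phase decomposition: split the lines into blank-separated blocks first, then scan each block once, carrying the sent_id across blocks.
import Mathlib
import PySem

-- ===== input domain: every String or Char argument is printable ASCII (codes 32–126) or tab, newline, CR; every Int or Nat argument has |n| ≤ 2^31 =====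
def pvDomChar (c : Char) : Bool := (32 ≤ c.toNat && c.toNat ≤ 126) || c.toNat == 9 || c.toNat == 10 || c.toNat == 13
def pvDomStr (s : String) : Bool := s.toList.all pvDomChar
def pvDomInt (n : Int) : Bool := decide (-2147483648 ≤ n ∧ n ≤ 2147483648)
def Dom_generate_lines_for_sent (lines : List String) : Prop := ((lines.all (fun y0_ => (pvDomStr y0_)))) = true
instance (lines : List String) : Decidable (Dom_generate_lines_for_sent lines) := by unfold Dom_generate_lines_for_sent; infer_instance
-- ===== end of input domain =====

-- B replaces A's per-line buffer/flush state machine by a two-phase split-into-blocks-then-scan decomposition (same cost); return values proved equal.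

-- ===== PORT A =====
-- state: (buf, id, out)
def pvAStep (st : List String × String × List (String × List String)) (line : String) :
    List String × String × List (String × List String) :=
  let (buf, id, out) := st
  if PySem.Str.startswith line "#" then
    if PySem.Str.startswith line "# sent_id = " then
      (buf, PySem.Str.replace (PySem.Str.strip line) "# sent_id = " "", out)
    else (buf, id, out)
  else if PySem.Str.strip line = "" then
    if buf ≠ [] then ([], id, out ++ [(id, buf)]) else (buf, id, out)
  else (buf ++ [PySem.Str.strip line], id, out)

def generate_lines_for_sent (lines : List String) : List (String × List String) :=
  let st := lines.foldl pvAStep ([], "", [])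
  let (buf, id, out) := st
  if buf ≠ [] then out ++ [(id, buf)] else out

-- ===== PORT B =====
-- _blocks: split into maximal runs of non-blank lines (foldl over the lines, state (cur, blocks))
def pvBlockStep (st : List String × List (List String)) (line : String) :
    List String × List (List String) :=
  let (cur, blocks) := st
  if PySem.Str.strip line ≠ "" then (cur ++ [line], blocks)
  else if cur ≠ [] then ([], blocks ++ [cur]) else (cur, blocks)

def pvBlocks (lines : List String) : List (List String) :=
  let (cur, blocks) := lines.foldl pvBlockStep ([], [])
  if cur ≠ [] then blocks ++ [cur] else blocks

-- one scan of a block: state (id, tokens)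
def pvScanLine (st : String × List String) (line : String) : String × List String :=
  if PySem.Str.startswith line "# sent_id = " then
    (PySem.Str.replace (PySem.Str.strip line) "# sent_id = " "", st.2)
  else if PySem.Str.startswith line "#" then st
  else (st.1, st.2 ++ [PySem.Str.strip line])

-- per-block step of B's outer loop: state (id, out)
def pvBStep (st : String × List (String × List String)) (block : List String) :
    String × List (String × List String) :=
  let (id', tokens) := block.foldl pvScanLine (st.1, [])
  (id', if tokens ≠ [] then st.2 ++ [(id', tokens)] else st.2)

def generate_lines_for_sent_alt (lines : List String) : List (String × List String) :=
  ((pvBlocks lines).foldl pvBStep ("", [])).2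

-- ===== PRECONDITION & SPEC =====
def Spec_generate_lines_for_sent (lines : List String) (out : List (String × List String)) : Prop := out = generate_lines_for_sent_alt lines
instance (lines : List String) (out : List (String × List String)) : Decidable (Spec_generate_lines_for_sent lines out) := by unfold Spec_generate_lines_for_sent; infer_instance

-- ===== CLAIM (what is proved, stated in full; the proofs are below) =====
def Claim_equal_generate_lines_for_sent : Prop := ∀ (lines : List String), Dom_generate_lines_for_sent lines → Spec_generate_lines_for_sent lines (generate_lines_for_sent lines)

-- ===== LEMMAS AND PROOFS =====

-- a comment line is never blank: stripping a string that starts with '#' is nonempty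
theorem strip_ne_empty_of_hash (s : String) (h : PySem.Str.startswith s "#" = true) :
    PySem.Str.strip s ≠ "" := by
  intro hc
  have h' : PySem.Chars.startswith s.toList ['#'] = true := by simpa using h
  have hc' : PySem.Chars.strip s.toList = [] := by
    have := congrArg String.toList hc; simpa using this
  simp [PySem.Chars.strip, PySem.Chars.lstrip, PySem.Chars.rstrip, PySem.Chars.startswith] at h' hc'
  obtain ⟨t, ht⟩ := h'
  rw [← ht] at hc'
  exact absurd (hc' '#' (by simp [show PySem.Chars.isspace '#' = false by decide])) (by decide)

-- a '# sent_id = ' line is in particular a comment line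
theorem startswith_hash_of_sentid (s : String) (h : PySem.Str.startswith s "# sent_id = " = true) :
    PySem.Str.startswith s "#" = true := by
  simp only [PySem.Str.startswith_eq, PySem.Chars.startswith_iff] at *
  exact List.IsPrefix.trans (by decide) h

-- recursive description of B's block splitting, continued from a pending run `cur`
def pvBlocksAux (cur : List String) : List String → List (List String)
  | [] => if cur ≠ [] then [cur] else []
  | l :: rest =>
    if PySem.Str.strip l ≠ "" then pvBlocksAux (cur ++ [l]) rest
    else (if cur ≠ [] then [cur] else []) ++ pvBlocksAux [] rest

theorem pvBlocks_fold_eq (lines : List String) :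
    ∀ (cur : List String) (bl : List (List String)),
    (if (lines.foldl pvBlockStep (cur, bl)).1 ≠ [] then
        (lines.foldl pvBlockStep (cur, bl)).2 ++ [(lines.foldl pvBlockStep (cur, bl)).1]
      else (lines.foldl pvBlockStep (cur, bl)).2)
      = bl ++ pvBlocksAux cur lines := by
  induction lines with
  | nil => intro cur bl; simp only [List.foldl_nil, pvBlocksAux]; split <;> simp
  | cons l rest ih =>
    intro cur bl
    by_cases h1 : PySem.Str.strip l = ""
    · by_cases h2 : cur = []
      · have hs : pvBlockStep (cur, bl) l = ([], bl) := by simp [pvBlockStep, h1, h2]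
        rw [List.foldl_cons, hs, ih [] bl]
        simp [pvBlocksAux, h1, h2]
      · have hs : pvBlockStep (cur, bl) l = ([], bl ++ [cur]) := by simp [pvBlockStep, h1, h2]
        rw [List.foldl_cons, hs, ih [] (bl ++ [cur])]
        simp [pvBlocksAux, h1, h2]
    · have hs : pvBlockStep (cur, bl) l = (cur ++ [l], bl) := by simp [pvBlockStep, h1]
      rw [List.foldl_cons, hs, ih (cur ++ [l]) bl]
      simp [pvBlocksAux, h1]

-- A's final flush, from an arbitrary state
def pvAFin (st : List String × String × List (String × List String)) : List (String × List String) :=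
  let (buf, id, out) := st
  if buf ≠ [] then out ++ [(id, buf)] else out

-- the core simulation: A's fold from the state determined by the pending raw block `cur`
-- equals B's fold over the remaining blocks
theorem pv_main (lines : List String) :
    ∀ (cur : List String) (id : String) (out : List (String × List String)),
    pvAFin (lines.foldl pvAStep
        (((cur.foldl pvScanLine (id, [])).2, (cur.foldl pvScanLine (id, [])).1, out)))
      = ((pvBlocksAux cur lines).foldl pvBStep (id, out)).2 := by
  induction lines with
  | nil =>
    intro cur id out
    by_cases hc : cur = []
    · simp [hc, pvBlocksAux, pvAFin]
    · rcases hsc : cur.foldl pvScanLine (id, []) with ⟨i, t⟩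
      have hbs : pvBStep (id, out) cur = (i, if t ≠ [] then out ++ [(i, t)] else out) := by
        simp [pvBStep, hsc]
      by_cases ht : t = [] <;>
        simp [pvBlocksAux, hc, hbs, pvAFin, ht]
  | cons l rest ih =>
    intro cur id out
    rw [List.foldl_cons]
    rcases hsc : cur.foldl pvScanLine (id, []) with ⟨i, t⟩
    have IH0 : ∀ (out' : List (String × List String)),
        pvAFin (rest.foldl pvAStep ([], i, out')) = ((pvBlocksAux [] rest).foldl pvBStep (i, out')).2 := by
      intro out'
      have h := ih [] i out'
      simpa using h
    by_cases hb : PySem.Str.strip l = ""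
    · have hh : ¬ PySem.Str.startswith l "#" = true := fun h => strip_ne_empty_of_hash l h hb
      have hh2 : ¬ PySem.Str.startswith l "# sent_id = " = true :=
        fun h => hh (startswith_hash_of_sentid l h)
      simp at hh hh2
      by_cases ht : t = []
      · have hstep : pvAStep ((i, t).2, (i, t).1, out) l = ([], i, out) := by
          simp [pvAStep, hh, hb, ht]
        rw [hstep, IH0 out]
        by_cases hc : cur = []
        · have hit : i = id ∧ t = [] := by
            rw [hc, List.foldl_nil] at hsc
            exact ⟨congrArg Prod.fst hsc.symm, congrArg Prod.snd hsc.symm⟩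
          simp [pvBlocksAux, hb, hc, hit.1]
        · have hbs : pvBStep (id, out) cur = (i, out) := by
            simp [pvBStep, hsc, ht]
          simp [pvBlocksAux, hb, hc, hbs]
      · have hstep : pvAStep ((i, t).2, (i, t).1, out) l = ([], i, out ++ [(i, t)]) := by
          simp [pvAStep, hh, hb, ht]
        have hc : cur ≠ [] := by
          intro hc; rw [hc, List.foldl_nil] at hsc
          exact ht (congrArg Prod.snd hsc.symm)
        rw [hstep, IH0 (out ++ [(i, t)])]
        have hbs : pvBStep (id, out) cur = (i, out ++ [(i, t)]) := by
          simp [pvBStep, hsc, ht]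
        simp [pvBlocksAux, hb, hc, hbs]
    · have hscan : (cur ++ [l]).foldl pvScanLine (id, []) = pvScanLine (i, t) l := by
        rw [List.foldl_append, List.foldl_cons, List.foldl_nil, hsc]
      have hstep : pvAStep ((i, t).2, (i, t).1, out) l
          = (((cur ++ [l]).foldl pvScanLine (id, [])).2, ((cur ++ [l]).foldl pvScanLine (id, [])).1, out) := by
        rw [hscan]
        by_cases hs1 : PySem.Str.startswith l "# sent_id = " = true
        · have hs2 := startswith_hash_of_sentid l hs1
          simp at hs1 hs2
          simp [pvAStep, pvScanLine, hs1, hs2]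
        · by_cases hs2 : PySem.Str.startswith l "#" = true
          · simp at hs1 hs2
            simp [pvAStep, pvScanLine, hs1, hs2]
          · simp at hs1 hs2
            simp [pvAStep, pvScanLine, hs1, hs2, hb]
      rw [hstep, ih (cur ++ [l]) id out]
      simp [pvBlocksAux, hb]

-- ===== VERDICT (by name: the statement is the Claim_ definition above) =====
theorem generate_lines_for_sent_spec : Claim_equal_generate_lines_for_sent := by
  intro lines _
  unfold Spec_generate_lines_for_sent generate_lines_for_sent generate_lines_for_sent_alt pvBlocks
  have h1 := pv_main lines [] "" []
  have h2 := pvBlocks_fold_eq lines [] []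
  simp only [List.foldl_nil, List.nil_append] at h1 h2
  rcases hf : List.foldl pvBlockStep ([], []) lines with ⟨c, b⟩
  rw [hf] at h2
  simp only [pvAFin] at h1
  rcases ha : List.foldl pvAStep ([], "", []) lines with ⟨buf, idv, outv⟩
  rw [ha] at h1
  simp only at h1 h2 ⊢
  rw [h1, ← h2]
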